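-- pv_equiv track=rewrite | github.com/pypi-data/pypi-mirror-126 | packages/autotrader/autotrader-0.5.1-py3-none-any.whl/autotrader/lib/indicators.py | candles_between_crosses
-- ===== SOURCE A (Python) =====
-- def candles_between_crosses(cross_list):
--     '''
--     Returns candles since last cross
--
--
--     Behaviour:
--     in:  [0, 0, 1, 0, 0, 0, -1, 0, 0, 0, 0, 0, 1]
--     out: [1, 2, 0, 1, 2, 3,  0, 1, 2, 3, 4, 5, 0]
--     '''
--
--     count = 0
--     count_list = []
--
--     for i in range(len(cross_list)):
--
--         if cross_list[i] == 0:
--             # Change in signal - reset count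
--             count += 1
--         else:
--             count = 0
--
--         count_list.append(count)
--
--     return count_list
-- ===== SOURCE B (Python) =====
-- def candles_between_crosses(cross_list):
--     # Run-length decomposition: split the list into maximal runs of zeros /
--     # nonzeros and emit a whole segment per run: range(1, m+1) for a zero run
--     # of length m (the count entering any zero run is always 0), and m zeros
--     # for a nonzero run of length m.
--     out = []
--     i, n = 0, len(cross_list)
--     while i < n:
--         zero = cross_list[i] == 0
--         j = i + 1
--         while j < n and (cross_list[j] == 0) == zero:
--             j += 1
--         m = j - i
--         out.extend(range(1, m + 1) if zero else [0] * m)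
--         i = j
--     return out
-- ===== Notes on version B (the rewrite author's own statement) =====
-- stated objective: alternative
-- what changed: B segments the input into maximal runs of zeros/nonzeros (run-length decomposition) and emits a whole block per run (1..m for a zero run, m zeros for a nonzero run), instead of A's per-element running counter that increments and resets.
import Mathlib
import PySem

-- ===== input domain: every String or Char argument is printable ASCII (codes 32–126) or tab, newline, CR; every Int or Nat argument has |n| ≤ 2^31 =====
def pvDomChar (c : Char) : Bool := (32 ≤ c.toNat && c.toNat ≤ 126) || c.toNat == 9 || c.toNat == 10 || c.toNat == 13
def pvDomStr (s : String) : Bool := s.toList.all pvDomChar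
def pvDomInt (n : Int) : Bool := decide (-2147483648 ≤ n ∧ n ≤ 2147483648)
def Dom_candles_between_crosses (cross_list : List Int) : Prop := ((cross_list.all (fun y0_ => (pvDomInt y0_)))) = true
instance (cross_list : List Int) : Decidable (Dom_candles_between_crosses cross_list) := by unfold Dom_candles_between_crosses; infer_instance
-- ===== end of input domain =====

-- B replaces A's per-element increment-and-reset counter by a run-length
-- decomposition: split into maximal zero/nonzero runs and emit a whole block
-- per run (alternative decomposition; same asymptotic cost).


-- ===== PORT A =====
-- A's loop over range(len(cross_list)): structural recursion consuming the
-- elements in order, carrying the running count; count resets to 0 on nonzero.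
def candlesA_go (count : Int) : List Int → List Int
  | [] => []
  | x :: rest =>
    let count' := if x = 0 then count + 1 else 0
    count' :: candlesA_go count' rest

def candles_between_crosses (cross_list : List Int) : List Int :=
  candlesA_go 0 cross_list

-- ===== PORT B =====
-- B's outer while loop: each step takes the maximal leading run of elements
-- of the same class as the head (the inner while j loop = takeWhile/dropWhile),
-- emits range(1, m+1) for a zero run or m zeros for a nonzero run, and recurses
-- on the remainder.
def candlesB_run : List Int → List Int
  | [] => []
  | x :: rest =>
    let zero := x == 0
    let m : Nat := (rest.takeWhile (fun y => (y == 0) == zero)).length + 1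
    (if zero then PySem.List.pyRange 1 ((m : Int) + 1) 1 else List.replicate m 0)
      ++ candlesB_run (rest.dropWhile (fun y => (y == 0) == zero))
termination_by xs => xs.length
decreasing_by
  simp only [List.length_cons]
  exact Nat.lt_succ_of_le (List.length_dropWhile_le _ _)

def candles_between_crosses_alt (cross_list : List Int) : List Int :=
  candlesB_run cross_list

-- ===== PRECONDITION & SPEC =====
def Spec_candles_between_crosses (cross_list : List Int) (out : List Int) : Prop := out = candles_between_crosses_alt cross_list
instance (cross_list : List Int) (out : List Int) : Decidable (Spec_candles_between_crosses cross_list out) := by unfold Spec_candles_between_crosses; infer_instance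

-- ===== CLAIM (what is proved, stated in full; the proofs are below) =====
def Claim_equal_candles_between_crosses : Prop := ∀ (cross_list : List Int), Dom_candles_between_crosses cross_list → Spec_candles_between_crosses cross_list (candles_between_crosses cross_list)

-- ===== LEMMAS AND PROOFS =====
-- A on a run of zeros emits c+1, c+2, …, c+len and continues with count c+len.
theorem range_map_shift (n : Nat) (c : Int) :
    (List.range (n + 1)).map (fun k : Nat => c + 1 + (k : Int)) =
      (c + 1) :: (List.range n).map (fun k : Nat => c + 2 + (k : Int)) := by
  rw [List.range_succ_eq_map]
  simp only [List.map_cons, List.map_map, Nat.cast_zero, add_zero]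
  exact congrArg _ (List.map_congr_left (fun k _ => by simp [Function.comp]; ring))

theorem candlesA_zero_run (zs : List Int) :
    ∀ (tail : List Int) (c : Int), (∀ y ∈ zs, y = 0) →
      candlesA_go c (zs ++ tail) =
        (List.range zs.length).map (fun k : Nat => c + 1 + (k : Int)) ++ candlesA_go (c + zs.length) tail := by
  induction zs with
  | nil => intro tail c _; simp
  | cons z zs ih =>
    intro tail c hz
    have hz0 : z = 0 := hz z (by simp)
    simp only [List.cons_append, candlesA_go, if_pos hz0]
    rw [ih tail (c + 1) (fun y hy => hz y (by simp [hy]))]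
    simp only [List.length_cons, range_map_shift]
    have h1 : (fun k : Nat => c + 1 + 1 + (k : Int)) = (fun k : Nat => c + 2 + (k : Int)) := by
      funext k; ring
    have h2 : c + 1 + (zs.length : Int) = c + ((zs.length : Nat) + 1 : Nat) := by
      push_cast; ring
    rw [h1, h2]
    simp

-- A on a nonempty run of nonzeros emits zeros and continues with count 0.
theorem candlesA_nonzero_run (ns : List Int) :
    ∀ (tail : List Int) (c : Int), (∀ y ∈ ns, y ≠ 0) → ns ≠ [] →
      candlesA_go c (ns ++ tail) = List.replicate ns.length 0 ++ candlesA_go 0 tail := by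
  induction ns with
  | nil => intro _ _ _ h; exact absurd rfl h
  | cons n ns ih =>
    intro tail c hn _
    have hn0 : n ≠ 0 := hn n (by simp)
    simp only [List.cons_append, candlesA_go, if_neg hn0]
    cases ns with
    | nil => simp
    | cons n' ns' =>
      rw [ih tail 0 (fun y hy => hn y (by simp at hy ⊢; tauto)) (by simp)]
      simp [List.replicate]

-- The incoming count is irrelevant when the list is empty or starts nonzero.
theorem candlesA_go_head_nonzero (xs : List Int) (c : Int)
    (h : ∀ y, xs.head? = some y → y ≠ 0) : candlesA_go c xs = candlesA_go 0 xs := by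
  cases xs with
  | nil => rfl
  | cons y rest =>
    have : y ≠ 0 := h y rfl
    simp [candlesA_go, if_neg this]

-- head of dropWhile fails the predicate
theorem head_dropWhile_false {α : Type} (p : α → Bool) (l : List α) :
    ∀ y, (l.dropWhile p).head? = some y → p y = false := by
  induction l with
  | nil => intro y h; simp [List.dropWhile] at h
  | cons a l ih =>
    intro y h
    rw [List.dropWhile_cons] at h
    by_cases hp : p a = true
    · exact ih y (by simpa [hp] using h)
    · simp [hp] at h; subst h; simpa using hp

theorem candles_main : ∀ (xs : List Int), candlesA_go 0 xs = candlesB_run xs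
  | [] => by simp [candlesA_go, candlesB_run]
  | x :: rest => by
    rw [candlesB_run.eq_def]
    simp only []
    set p := fun y : Int => (y == 0) == (x == 0) with hp
    have hsplit : x :: rest = (x :: rest.takeWhile p) ++ rest.dropWhile p := by
      simp [List.takeWhile_append_dropWhile]
    have hrec : candlesA_go 0 (rest.dropWhile p) = candlesB_run (rest.dropWhile p) :=
      candles_main (rest.dropWhile p)
    by_cases hx : x = 0
    · -- zero run
      have hz : ∀ y ∈ x :: rest.takeWhile p, y = 0 := by
        intro y hy
        rcases List.mem_cons.mp hy with h | h
        · simpa [h] using hx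
        · have := List.mem_takeWhile_imp h
          simp [hp, hx] at this; exact this
      rw [hsplit, candlesA_zero_run _ _ _ hz]
      have hhead : ∀ y, (rest.dropWhile p).head? = some y → y ≠ 0 := by
        intro y hy
        have := head_dropWhile_false p rest y hy
        simp [hp, hx] at this; exact this
      rw [candlesA_go_head_nonzero _ _ hhead, hrec]
      have hm : ((x == 0) : Bool) = true := by simp [hx]
      rw [if_pos hm, PySem.List.pyRange_one]
      congr 1
      · have : ((((rest.takeWhile p).length + 1 : Nat) : Int) + 1 - 1).toNat
            = (rest.takeWhile p).length + 1 := by omega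
        rw [this]
        simp only [List.length_cons]
        refine List.map_congr_left (fun k _ => ?_)
        omega
    · -- nonzero run
      have hn : ∀ y ∈ x :: rest.takeWhile p, y ≠ 0 := by
        intro y hy
        rcases List.mem_cons.mp hy with h | h
        · simpa [h] using hx
        · have := List.mem_takeWhile_imp h
          simp [hp, hx] at this; exact this
      rw [hsplit, candlesA_nonzero_run _ _ _ hn (by simp), hrec]
      have hm : ((x == 0) : Bool) = false := by simp [hx]
      rw [if_neg (by simp [hm])]
      simp [List.length_cons]
termination_by xs => xs.length
decreasing_by
  have h := List.length_dropWhile_le (p := p) rest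
  rw [hp] at h
  simp only [List.length_cons]
  omega

-- ===== VERDICT (by name: the statement is the Claim_ definition above) =====
theorem candles_between_crosses_spec : Claim_equal_candles_between_crosses := by
  intro xs _
  unfold Spec_candles_between_crosses candles_between_crosses candles_between_crosses_alt
  exact candles_main xs
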